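-- pv_equiv track=rewrite | github.com/kimalise/deeplearning_course | 2025/mvsa_sentiment_analysis.py | generate_exmaples
-- ===== SOURCE A (Python) =====
-- def generate_exmaples(image_files, text_files, label_dict):
--     label_vocab = {}
--     label_index = 0
--     examples = []
--     for key, value in label_dict.items():
--         image_file = str(key) + ".jpg"
--         text_file = str(key) + ".txt"
--         label = value
--
--         examples.append({
--             "text": text_file,
--             "image": image_file,
--             "label": label
--         })
--
--         if not label in label_vocab:
--             label_vocab[label] = label_index
--             label_index += 1
--
--     return examples, label_vocab
-- ===== SOURCE B (Python) =====
-- def generate_exmaples(image_files, text_files, label_dict):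
--     examples = [
--         {"text": str(key) + ".txt", "image": str(key) + ".jpg", "label": value}
--         for key, value in label_dict.items()
--     ]
--     labels = [value for value in label_dict.values()]
--     label_vocab = {
--         label: len(set(labels[:i]))
--         for i, label in enumerate(labels)
--         if label not in labels[:i]
--     }
--     return examples, label_vocab
-- ===== Notes on version B (the rewrite author's own statement) =====
-- stated objective: alternative
-- what changed: Drops A's sequential accumulator state (seen-vocab membership check plus running counter) entirely: B computes each vocab entry independently per position, keeping a label iff it is absent from the prefix slice labels[:i] and assigning it len(set(labels[:i])), the count of distinct labels before its first occurrence; examples become a comprehension. The trade is a quadratic number of prefix scans in exchange for having no loop-carried state.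
import Mathlib
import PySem

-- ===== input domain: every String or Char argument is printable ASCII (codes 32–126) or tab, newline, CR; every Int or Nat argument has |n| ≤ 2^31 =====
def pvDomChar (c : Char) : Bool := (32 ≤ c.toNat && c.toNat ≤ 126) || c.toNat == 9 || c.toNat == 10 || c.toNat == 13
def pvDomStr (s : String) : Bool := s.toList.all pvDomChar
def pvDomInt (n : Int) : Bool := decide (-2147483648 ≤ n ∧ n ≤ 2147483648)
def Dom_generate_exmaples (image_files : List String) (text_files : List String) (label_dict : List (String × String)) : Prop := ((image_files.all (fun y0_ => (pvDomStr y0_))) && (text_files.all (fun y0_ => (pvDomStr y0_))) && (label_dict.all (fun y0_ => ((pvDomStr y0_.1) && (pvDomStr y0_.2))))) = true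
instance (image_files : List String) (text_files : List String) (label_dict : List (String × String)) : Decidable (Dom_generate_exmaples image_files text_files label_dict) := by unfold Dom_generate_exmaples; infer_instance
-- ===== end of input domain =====

-- B removes A's sequential accumulator (seen-vocab + counter): each vocab entry is computed
-- independently from the prefix slice labels[:i] (kept iff first occurrence, index =
-- len(set(labels[:i]))); examples become a comprehension (objective: alternative).


-- ===== PORT A =====
-- A's loop body: build the example dict, then conditionally extend the vocab with the counter
def pvStepA (st : List (List (String × String)) × List (String × Int) × Int)
    (kv : String × String) : List (List (String × String)) × List (String × Int) × Int :=
  let image_file := kv.1 ++ ".jpg"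
  let text_file := kv.1 ++ ".txt"
  let label := kv.2
  let examples := st.1 ++ [[("text", text_file), ("image", image_file), ("label", label)]]
  if st.2.1.any (fun p => p.1 == label) then
    (examples, st.2.1, st.2.2)
  else
    (examples, st.2.1 ++ [(label, st.2.2)], st.2.2 + 1)

def generate_exmaples (image_files : List String) (text_files : List String) (label_dict : List (String × String)) : (List (List (String × String))) × (List (String × Int)) :=
  let r := label_dict.foldl pvStepA ([], [], 0)
  (r.1, r.2.1)

-- ===== PORT B =====
-- Source B: examples by comprehension; vocab entry per position i, kept iff the label is not in
-- labels[:i] (first occurrence), with value len(set(labels[:i]))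
def generate_exmaples_alt (image_files : List String) (text_files : List String) (label_dict : List (String × String)) : (List (List (String × String))) × (List (String × Int)) :=
  let labels := label_dict.map (fun kv => kv.2)
  (label_dict.map (fun kv => [("text", kv.1 ++ ".txt"), ("image", kv.1 ++ ".jpg"), ("label", kv.2)]),
   (PySem.List.enumerate labels).filterMap (fun q =>
     if q.2 ∈ PySem.List.slice labels none (some q.1) then none
     else some (q.2, ((PySem.Set.ofList (PySem.List.slice labels none (some q.1))).length : Int))))

-- ===== PRECONDITION & SPEC =====
def Spec_generate_exmaples (image_files : List String) (text_files : List String) (label_dict : List (String × String)) (out : (List (List (String × String))) × (List (String × Int))) : Prop := out = generate_exmaples_alt image_files text_files label_dict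
instance (image_files : List String) (text_files : List String) (label_dict : List (String × String)) (out : (List (List (String × String))) × (List (String × Int))) : Decidable (Spec_generate_exmaples image_files text_files label_dict out) := by unfold Spec_generate_exmaples; infer_instance

-- ===== CLAIM (what is proved, stated in full; the proofs are below) =====
def Claim_equal_generate_exmaples : Prop := ∀ (image_files : List String) (text_files : List String) (label_dict : List (String × String)), Dom_generate_exmaples image_files text_files label_dict → Spec_generate_exmaples image_files text_files label_dict (generate_exmaples image_files text_files label_dict)

-- ===== LEMMAS AND PROOFS =====

-- common intermediate form: the vocab entries contributed by the labels `ls` given the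
-- already-seen raw label prefix `p`
def pvTailS (p : List String) : List String → List (String × Int)
  | [] => []
  | l :: ls => if l ∈ p then pvTailS (p ++ [l]) ls
      else (l, ((PySem.Set.ofList p).length : Int)) :: pvTailS (p ++ [l]) ls

lemma pvAny_eq_mem (vocab : List (String × Int)) (l : String) :
    (vocab.any (fun p => p.1 == l)) = decide (l ∈ vocab.map Prod.fst) := by
  by_cases h : l ∈ vocab.map Prod.fst
  · obtain ⟨p, hp, he⟩ := List.mem_map.1 h
    simp only [h, decide_true]
    exact List.any_eq_true.2 ⟨p, hp, by simp [he]⟩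
  · simp only [h, decide_false]
    refine List.any_eq_false.2 (fun p hp => ?_)
    exact fun hbe => h (List.mem_map.2 ⟨p, hp, beq_iff_eq.1 hbe⟩)

-- B's filterMap over the enumeration, decomposed against a seen prefix p
lemma enumB (ls : List String) : ∀ (p : List String),
    (PySem.List.enumerate ls (p.length : Int)).filterMap (fun q =>
      if q.2 ∈ PySem.List.slice (p ++ ls) none (some q.1) then none
      else some (q.2, ((PySem.Set.ofList (PySem.List.slice (p ++ ls) none (some q.1))).length : Int)))
    = pvTailS p ls := by
  induction ls with
  | nil => intro p; simp [pvTailS]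
  | cons l ls ih =>
    intro p
    have hsl : PySem.List.slice (p ++ l :: ls) none (some (p.length : Int)) = p := by
      rw [PySem.List.slice_to_natCast]
      simp
    have happ : p ++ l :: ls = (p ++ [l]) ++ ls := by simp
    have hlen : (p.length : Int) + 1 = ((p ++ [l]).length : Int) := by push_cast; simp
    rw [PySem.List.enumerate_cons, List.filterMap_cons]
    simp only [hsl]
    by_cases h : l ∈ p
    · rw [if_pos h, hlen, happ, ih (p ++ [l])]
      simp [pvTailS, h]
    · rw [if_neg h, hlen, happ, ih (p ++ [l])]
      simp [pvTailS, h]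

-- A's loop against the same decomposition: with counter = vocab length and vocab keys = the
-- distinct labels of the raw prefix p
lemma loopA (rest : List (String × String)) : ∀ (p : List String) (v : List (String × Int))
    (ex : List (List (String × String))),
    (∀ l, l ∈ p ↔ l ∈ v.map Prod.fst) → ((PySem.Set.ofList p).length = v.length) →
    rest.foldl pvStepA (ex, v, (v.length : Int)) =
      (ex ++ rest.map (fun kv => [("text", kv.1 ++ ".txt"), ("image", kv.1 ++ ".jpg"), ("label", kv.2)]),
       v ++ pvTailS p (rest.map (fun kv => kv.2)),
       ((v ++ pvTailS p (rest.map (fun kv => kv.2))).length : Int)) := by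
  induction rest with
  | nil => intro p v ex _ _; simp [pvTailS]
  | cons kv rest ih =>
    intro p v ex h1 h2
    have hmem : kv.2 ∈ p ↔ kv.2 ∈ v.map Prod.fst := h1 kv.2
    by_cases h : kv.2 ∈ p
    · have hv : kv.2 ∈ v.map Prod.fst := hmem.1 h
      have hstep : pvStepA (ex, v, (v.length : Int)) kv =
          (ex ++ [[("text", kv.1 ++ ".txt"), ("image", kv.1 ++ ".jpg"), ("label", kv.2)]],
           v, (v.length : Int)) := by
        simp [pvStepA, pvAny_eq_mem, hv]
      have h2' : (PySem.Set.ofList (p ++ [kv.2])).length = v.length := by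
        rw [PySem.Set.ofList_append_singleton,
            PySem.Set.add_of_mem ((PySem.Set.mem_ofList _ _).2 h)]
        exact h2
      have h1' : ∀ l, l ∈ p ++ [kv.2] ↔ l ∈ v.map Prod.fst := by
        intro l
        simp only [List.mem_append, List.mem_singleton]
        constructor
        · rintro (hl | rfl)
          · exact (h1 l).1 hl
          · exact hv
        · intro hl
          exact Or.inl ((h1 l).2 hl)
      rw [List.foldl_cons, hstep, ih (p ++ [kv.2]) v _ h1' h2']
      simp [pvTailS, h]
    · have hv : kv.2 ∉ v.map Prod.fst := fun hc => h (hmem.2 hc)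
      have hstep : pvStepA (ex, v, (v.length : Int)) kv =
          (ex ++ [[("text", kv.1 ++ ".txt"), ("image", kv.1 ++ ".jpg"), ("label", kv.2)]],
           v ++ [(kv.2, (v.length : Int))], (v.length : Int) + 1) := by
        simp [pvStepA, pvAny_eq_mem, hv]
      have h2' : (PySem.Set.ofList (p ++ [kv.2])).length = (v ++ [(kv.2, (v.length : Int))]).length := by
        rw [PySem.Set.ofList_append_singleton,
            PySem.Set.add_of_not_mem (fun hc => h ((PySem.Set.mem_ofList _ _).1 hc))]
        simp [h2]
      have h1' : ∀ l, l ∈ p ++ [kv.2] ↔ l ∈ (v ++ [(kv.2, (v.length : Int))]).map Prod.fst := by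
        intro l
        simp only [List.mem_append, List.mem_singleton, List.map_append, List.map_cons,
          List.map_nil]
        constructor
        · rintro (hl | rfl)
          · exact Or.inl ((h1 l).1 hl)
          · simp
        · rintro (hl | hl)
          · exact Or.inl ((h1 l).2 hl)
          · simp_all
      have hlen : ((v ++ [(kv.2, (v.length : Int))]).length : Int) = (v.length : Int) + 1 := by
        simp
      rw [List.foldl_cons, hstep, ← hlen, ih (p ++ [kv.2]) _ _ h1' h2']
      simp [pvTailS, h, h2, List.append_assoc]

-- ===== VERDICT (by name: the statement is the Claim_ definition above) =====
theorem generate_exmaples_spec : Claim_equal_generate_exmaples := by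
  intro image_files text_files label_dict _
  unfold Spec_generate_exmaples generate_exmaples generate_exmaples_alt
  have hA := loopA label_dict [] [] [] (by simp) (by simp [PySem.Set.ofList])
  simp only [List.length_nil, Nat.cast_zero] at hA
  have hB := enumB (label_dict.map (fun kv => kv.2)) []
  simp only [List.length_nil, Nat.cast_zero, List.nil_append] at hB
  simp [hA, hB]
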